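-- pv_equiv track=rewrite | github.com/solaxx81/Boring_Stuff | 06/workbook/coordinateDirections.py | coordonnees
-- ===== SOURCE A (Python) =====
-- def coordonnees(directions):
--     """Accepte une liste de directions (N,S,E,O) et retourne des coordonnées cartésiennes
--
--     Args:
--         directions (list[str]): liste de directions
--
--     Returns:
--         list[int] : coordonnées cartésiennes
--     """
--     x = 0
--     y = 0
--     for direction in directions:
--         if direction == "E":
--             x += 1
--         elif direction == "O":
--             x -= 1
--         elif direction == "N":
--             y += 1
--         elif direction == "S":
--             y -= 1
--
--     return [x, y]
-- ===== SOURCE B (Python) =====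
-- STEP = {"E": (1, 0), "O": (-1, 0), "N": (0, 1), "S": (0, -1)}
--
--
-- def _solve(ds):
--     """Vector sum of the step table values by divide and conquer."""
--     if not ds:
--         return (0, 0)
--     if len(ds) == 1:
--         return STEP.get(ds[0], (0, 0))
--     m = len(ds) // 2
--     ax, ay = _solve(ds[:m])
--     bx, by = _solve(ds[m:])
--     return (ax + bx, ay + by)
--
--
-- def coordonnees(directions):
--     x, y = _solve(directions)
--     return [x, y]
-- ===== Notes on version B (the rewrite author's own statement) =====
-- stated objective: alternative
-- what changed: Replaces the linear branch-and-accumulate loop with a table-driven divide-and-conquer: each direction is mapped to a step vector via a lookup table and the vectors are summed by recursively splitting the list in halves (correct because vector addition is associative and commutative).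
import Mathlib
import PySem

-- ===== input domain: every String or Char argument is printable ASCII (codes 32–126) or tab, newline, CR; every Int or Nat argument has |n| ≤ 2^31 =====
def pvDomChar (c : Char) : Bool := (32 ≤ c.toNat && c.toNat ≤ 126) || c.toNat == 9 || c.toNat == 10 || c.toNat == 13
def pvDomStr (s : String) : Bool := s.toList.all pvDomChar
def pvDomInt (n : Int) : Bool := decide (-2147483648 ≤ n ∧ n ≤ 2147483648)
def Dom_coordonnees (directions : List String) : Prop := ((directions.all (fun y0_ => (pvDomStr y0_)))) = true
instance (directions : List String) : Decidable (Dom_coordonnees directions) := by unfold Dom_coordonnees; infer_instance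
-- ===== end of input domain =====

-- B replaces the branch-per-element accumulation with a table-driven divide-and-conquer
-- vector sum; objective: alternative (same cost, different algorithm).

-- ===== PORT A =====
-- literal port of A's loop: fold over directions carrying (x, y), branch chain in source order
def coordonnees (directions : List String) : List Int :=
  let s := directions.foldl (fun (p : Int × Int) direction =>
    if direction = "E" then (p.1 + 1, p.2)
    else if direction = "O" then (p.1 - 1, p.2)
    else if direction = "N" then (p.1, p.2 + 1)
    else if direction = "S" then (p.1, p.2 - 1)
    else p) (0, 0)
  [s.1, s.2]

-- ===== PORT B =====
-- port of Source B: the STEP lookup table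
def pvSTEP : PySem.Dict String (Int × Int) :=
  PySem.Dict.ofList [("E", (1, 0)), ("O", (-1, 0)), ("N", (0, 1)), ("S", (0, -1))]

-- port of Source B's _solve: divide-and-conquer vector sum (ds[:m] / ds[m:] as take/drop of len//2)
def pvSolve (ds : List String) : Int × Int :=
  if ds = [] then (0, 0)
  else if ds.length = 1 then pvSTEP.getD (ds.headI) (0, 0)
  else
    let m := ds.length / 2
    let a := pvSolve (ds.take m)
    let b := pvSolve (ds.drop m)
    (a.1 + b.1, a.2 + b.2)
termination_by ds.length
decreasing_by
  · rename_i h1 h2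
    have : ds.length ≠ 0 := by simpa [List.length_eq_zero_iff] using h1
    simp only [List.length_take]; omega
  · rename_i h1 h2
    have : ds.length ≠ 0 := by simpa [List.length_eq_zero_iff] using h1
    simp only [List.length_drop]; omega

def coordonnees_alt (directions : List String) : List Int :=
  let s := pvSolve directions
  [s.1, s.2]

-- ===== PRECONDITION & SPEC =====
def Spec_coordonnees (directions : List String) (out : List Int) : Prop := out = coordonnees_alt directions
instance (directions : List String) (out : List Int) : Decidable (Spec_coordonnees directions out) := by unfold Spec_coordonnees; infer_instance

-- ===== CLAIM (what is proved, stated in full; the proofs are below) =====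
def Claim_equal_coordonnees : Prop := ∀ (directions : List String), Dom_coordonnees directions → Spec_coordonnees directions (coordonnees directions)

-- ===== LEMMAS AND PROOFS =====

-- the STEP table lookup, as a branch on the key
theorem pvSTEP_getD (d : String) : pvSTEP.getD d (0, 0) =
    if d = "E" then (1, 0) else if d = "O" then (-1, 0)
    else if d = "N" then (0, 1) else if d = "S" then (0, -1) else (0, 0) := by
  have h : pvSTEP = PySem.Dict.mk [("E", (1, 0)), ("O", (-1, 0)), ("N", (0, 1)), ("S", (0, -1))] := by
    decide
  rw [h]
  by_cases hE : d = "E" <;> by_cases hO : d = "O" <;> by_cases hN : d = "N" <;>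
    by_cases hS : d = "S" <;>
    simp_all [PySem.Dict.getD, PySem.Dict.get?, Ne.symm]

-- the A-loop state after processing xs, started from (x, y), in terms of counts
theorem pvA_loop (xs : List String) (x y : Int) :
    xs.foldl (fun (p : Int × Int) direction =>
      if direction = "E" then (p.1 + 1, p.2)
      else if direction = "O" then (p.1 - 1, p.2)
      else if direction = "N" then (p.1, p.2 + 1)
      else if direction = "S" then (p.1, p.2 - 1)
      else p) (x, y)
    = (x + (xs.count "E" : Int) - xs.count "O", y + (xs.count "N" : Int) - xs.count "S") := by
  induction xs generalizing x y with
  | nil => simp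
  | cons h t ih =>
    simp only [List.foldl_cons, List.count_cons]
    by_cases hE : h = "E" <;> by_cases hO : h = "O" <;> by_cases hN : h = "N" <;>
      by_cases hS : h = "S" <;> simp_all <;> ring

-- the divide-and-conquer sum also equals the count differences (strong induction on length)
theorem pvSolve_eq (n : Nat) : ∀ ds : List String, ds.length ≤ n →
    pvSolve ds = ((ds.count "E" : Int) - ds.count "O", (ds.count "N" : Int) - ds.count "S") := by
  induction n with
  | zero =>
    intro ds h
    have : ds = [] := by simpa [List.length_eq_zero_iff] using Nat.le_zero.mp h
    subst this
    simp [pvSolve]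
  | succ n ih =>
    intro ds h
    rw [pvSolve]
    by_cases h0 : ds = []
    · subst h0; simp
    · simp only [h0, if_false]
      by_cases h1 : ds.length = 1
      · match ds, h1 with
        | [d], _ =>
          simp only [List.length_cons, List.length_nil, if_true, List.headI,
            List.count_cons, List.count_nil, pvSTEP_getD]
          by_cases hE : d = "E" <;> by_cases hO : d = "O" <;> by_cases hN : d = "N" <;>
            by_cases hS : d = "S" <;> simp_all
      · simp only [h1, if_false]
        have hlen : ds.length ≠ 0 := by simpa [List.length_eq_zero_iff] using h0
        have hm : ds.length / 2 < ds.length := by omega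
        have hm1 : 1 ≤ ds.length / 2 := by omega
        have ht : (ds.take (ds.length / 2)).length ≤ n := by
          simp only [List.length_take]; omega
        have hd : (ds.drop (ds.length / 2)).length ≤ n := by
          simp only [List.length_drop]; omega
        rw [ih _ ht, ih _ hd]
        have hsplit : ∀ k : String, ds.count k =
            (ds.take (ds.length / 2)).count k + (ds.drop (ds.length / 2)).count k := by
          intro k
          conv_lhs => rw [← List.take_append_drop (ds.length / 2) ds]
          rw [List.count_append]
        rw [hsplit "E", hsplit "O", hsplit "N", hsplit "S"]
        push_cast
        simp only [Prod.mk.injEq]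
        constructor <;> ring

-- ===== VERDICT (by name: the statement is the Claim_ definition above) =====
theorem coordonnees_spec : Claim_equal_coordonnees := by
  intro directions _
  unfold Spec_coordonnees coordonnees coordonnees_alt
  rw [pvA_loop, pvSolve_eq directions.length directions (Nat.le_refl _)]
  simp
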